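-- pv_equiv track=rewrite | github.com/nirob556/Ff-tcp | NIROB.py | fix_num
-- ===== SOURCE A (Python) =====
-- def fix_num(num):
--     fixed = ""
--     count = 0
--     num_str = str(num)
--     for char in num_str:
--         if char.isdigit():
--             count += 1
--         fixed += char
--         if count == 3:
--             fixed += "[c]"
--             count = 0
--     return fixed
-- ===== SOURCE B (Python) =====
-- def chunks(d):
--     if len(d) < 3:
--         return d
--     return d[:3] + "[c]" + chunks(d[3:])
--
--
-- def fix_num(num):
--     s = str(num)
--     if num < 0:
--         return "-" + chunks(s[1:])
--     return chunks(s)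
-- ===== Notes on version B (the rewrite author's own statement) =====
-- stated objective: simpler
-- what changed: Replaces the character loop with a digit counter by splitting off the optional sign and recursively taking three-character chunks of the digit string, appending '[c]' after each complete chunk.
import Mathlib
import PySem

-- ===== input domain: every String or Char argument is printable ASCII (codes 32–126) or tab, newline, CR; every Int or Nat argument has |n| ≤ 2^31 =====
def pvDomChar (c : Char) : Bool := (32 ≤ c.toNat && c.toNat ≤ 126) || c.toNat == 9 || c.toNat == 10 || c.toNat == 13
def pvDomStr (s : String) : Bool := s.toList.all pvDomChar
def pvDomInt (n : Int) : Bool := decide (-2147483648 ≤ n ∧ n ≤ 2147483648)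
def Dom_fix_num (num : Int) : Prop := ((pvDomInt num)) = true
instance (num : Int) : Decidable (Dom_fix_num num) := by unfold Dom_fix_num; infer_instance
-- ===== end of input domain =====

-- B replaces A's digit-counter loop by sign split + recursive three-character chunking (objective: simpler).

-- ===== PORT A =====
-- literal port of A: fold over the characters of str(num) carrying (fixed, count)
def fixNumStep (st : List Char × Int) (char : Char) : List Char × Int :=
  let count := if PySem.Chars.isdigit char then st.2 + 1 else st.2
  let fixed := st.1 ++ [char]
  if count = 3 then (fixed ++ ['[', 'c', ']'], 0) else (fixed, count)

def fix_num (num : Int) : String :=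
  let num_str := PySem.Int.toStr num
  String.ofList (num_str.toList.foldl fixNumStep ([], 0)).1

-- ===== PORT B =====
-- port of Source B's chunks: if len(d) < 3 return d else d[:3] + "[c]" + chunks(d[3:])
def chunksL (d : List Char) : List Char :=
  if d.length < 3 then d
  else d.take 3 ++ ['[', 'c', ']'] ++ chunksL (d.drop 3)
termination_by d.length
decreasing_by simp; omega

def fix_num_alt (num : Int) : String :=
  let s := PySem.Int.toStr num
  if num < 0 then String.ofList ('-' :: chunksL (s.toList.drop 1))
  else String.ofList (chunksL s.toList)

-- ===== PRECONDITION & SPEC =====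
def Spec_fix_num (num : Int) (out : String) : Prop := out = fix_num_alt num
instance (num : Int) (out : String) : Decidable (Spec_fix_num num out) := by unfold Spec_fix_num; infer_instance

-- ===== CLAIM (what is proved, stated in full; the proofs are below) =====
def Claim_equal_fix_num : Prop := ∀ (num : Int), Dom_fix_num num → Spec_fix_num num (fix_num num)

-- ===== LEMMAS AND PROOFS =====

theorem isdigit_digitChar (d : Nat) (hd : d < 10) :
    PySem.Chars.isdigit (Nat.digitChar d) = true := by
  interval_cases d <;> decide

theorem mem_toDigitsCore_isdigit (fuel : Nat) :
    ∀ (n : Nat) (acc : List Char), (∀ c ∈ acc, PySem.Chars.isdigit c = true) →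
    ∀ c ∈ Nat.toDigitsCore 10 fuel n acc, PySem.Chars.isdigit c = true := by
  induction fuel with
  | zero => intro n acc hacc c hc; exact hacc c hc
  | succ fuel ih =>
    intro n acc hacc ch hch
    rw [Nat.toDigitsCore] at hch
    have hdig : PySem.Chars.isdigit (Nat.digitChar (n % 10)) = true :=
      isdigit_digitChar _ (Nat.mod_lt _ (by norm_num))
    by_cases h : n / 10 = 0
    · simp only [h] at hch
      rcases List.mem_cons.mp hch with hch | hch
      · exact hch ▸ hdig
      · exact hacc ch hch
    · simp only [h] at hch
      exact ih (n / 10) _ (by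
        intro x hx
        rcases List.mem_cons.mp hx with hx | hx
        · exact hx ▸ hdig
        · exact hacc x hx) ch hch

theorem toDigits_isdigit (m : Nat) :
    ∀ c ∈ Nat.toDigits 10 m, PySem.Chars.isdigit c = true := by
  intro c hc
  exact mem_toDigitsCore_isdigit (m + 1) m [] (by simp) c hc

-- the core equivalence: on a list of digit characters, A's counter loop produces B's chunking
theorem foldA_chunks : ∀ (d : List Char), (∀ c ∈ d, PySem.Chars.isdigit c = true) →
    ∀ acc : List Char,
    d.foldl fixNumStep (acc, 0) = (acc ++ chunksL d, ((d.length % 3 : Nat) : Int))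
  | [], _, acc => by simp [chunksL]
  | [a], h, acc => by
    have ha := h a (by simp)
    simp [fixNumStep, ha, chunksL]
  | [a, b], h, acc => by
    have ha := h a (by simp)
    have hb := h b (by simp)
    simp [fixNumStep, ha, hb, chunksL]
  | a :: b :: c :: rest, h, acc => by
    have ha := h a (by simp)
    have hb := h b (by simp)
    have hc := h c (by simp)
    have hrest : ∀ x ∈ rest, PySem.Chars.isdigit x = true := by
      intro x hx; exact h x (by simp [hx])
    have three : (a :: b :: c :: rest).foldl fixNumStep (acc, 0) =
        rest.foldl fixNumStep (acc ++ [a, b, c, '[', 'c', ']'], 0) := by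
      simp [List.foldl, fixNumStep, ha, hb, hc]
    rw [three, foldA_chunks rest hrest]
    have hch : chunksL (a :: b :: c :: rest) =
        [a, b, c, '[', 'c', ']'] ++ chunksL rest := by
      rw [chunksL]; simp
    rw [hch, Prod.mk.injEq]
    refine ⟨by simp, ?_⟩
    simp only [List.length_cons]
    congr 1
    omega
termination_by d => d.length

theorem toChars_nonneg (num : Int) (h : ¬ num < 0) :
    (PySem.Int.toStr num).toList = Nat.toDigits 10 num.toNat := by
  rw [PySem.Int.toList_toStr, PySem.Int.toChars, if_neg h]

theorem toChars_neg (num : Int) (h : num < 0) :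
    (PySem.Int.toStr num).toList = '-' :: Nat.toDigits 10 num.natAbs := by
  rw [PySem.Int.toList_toStr, PySem.Int.toChars, if_pos h]

-- ===== VERDICT (by name: the statement is the Claim_ definition above) =====
theorem fix_num_spec : Claim_equal_fix_num := by
  intro num _
  unfold Spec_fix_num fix_num fix_num_alt
  dsimp only
  by_cases h : num < 0
  · rw [toChars_neg num h]
    have hm : PySem.Chars.isdigit '-' = false := by decide
    have step1 : fixNumStep ([], 0) '-' = (['-'], 0) := by
      simp [fixNumStep, hm]
    simp only [List.foldl_cons, step1,
      foldA_chunks (Nat.toDigits 10 num.natAbs) (toDigits_isdigit _) ['-'], if_pos h]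
    simp
  · rw [toChars_nonneg num h]
    simp only [foldA_chunks (Nat.toDigits 10 num.toNat) (toDigits_isdigit _) [], if_neg h]
    simp
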